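-- pv_equiv track=rewrite | github.com/remizu23/Okinawa_RF | code/DKP_RF_inf.py | get_stay_events
-- ===== SOURCE A (Python) =====
-- def get_stay_events(seq, stay_offset=19, pad_token=38):
--     """
--     数列から滞在イベントを抽出
--     Returns: list of dict {'start': int, 'end': int, 'node': int, 'dur': int}
--     """
--     events = []
--     n = len(seq)
--     i = 0
--     while i < n:
--         token = seq[i]
--         if stay_offset <= token < pad_token:
--             start = i
--             node_id = token - stay_offset
--             while i < n and seq[i] == token:
--                 i += 1
--             end = i
--             duration = end - start
--             events.append({
--                 'start': start,
--                 'end': end,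
--                 'node': node_id,
--                 'dur': duration
--             })
--         else:
--             i += 1
--     return events
-- ===== SOURCE B (Python) =====
-- def get_stay_events(seq, stay_offset=19, pad_token=38):
--     """
--     数列から滞在イベントを抽出 (two-pass: run-length encode, then filter/emit)
--     Returns: list of dict {'start': int, 'end': int, 'node': int, 'dur': int}
--     """
--     # pass 1: run-length encode the sequence into (token, length) runs
--     runs = []
--     for t in seq:
--         if runs and runs[-1][0] == t:
--             runs[-1] = (t, runs[-1][1] + 1)
--         else:
--             runs.append((t, 1))
--     # pass 2: walk the runs with a cumulative start index, emitting stay runs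
--     events = []
--     start = 0
--     for t, k in runs:
--         end = start + k
--         if stay_offset <= t < pad_token:
--             events.append({'start': start, 'end': end, 'node': t - stay_offset, 'dur': k})
--         start = end
--     return events
-- ===== Notes on version B (the rewrite author's own statement) =====
-- stated objective: idiomatic
-- what changed: Replaces the index-based nested-while run detection with a two-pass pipeline: run-length encode the sequence into (token, length) runs, then a simple scan over the runs with a cumulative start index that filters and emits the stay events.
import Mathlib
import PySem

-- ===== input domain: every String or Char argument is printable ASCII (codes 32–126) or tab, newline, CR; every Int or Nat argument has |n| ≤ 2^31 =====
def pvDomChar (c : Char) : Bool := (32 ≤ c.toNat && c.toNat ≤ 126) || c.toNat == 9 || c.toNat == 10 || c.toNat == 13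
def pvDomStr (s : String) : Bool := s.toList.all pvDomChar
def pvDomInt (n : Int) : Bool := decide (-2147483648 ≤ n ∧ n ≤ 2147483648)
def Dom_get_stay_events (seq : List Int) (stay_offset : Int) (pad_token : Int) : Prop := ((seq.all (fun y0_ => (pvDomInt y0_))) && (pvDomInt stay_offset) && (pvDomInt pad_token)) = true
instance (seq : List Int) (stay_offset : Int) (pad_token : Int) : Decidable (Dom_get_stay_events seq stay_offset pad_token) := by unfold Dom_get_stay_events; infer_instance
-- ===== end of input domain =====

-- B is an idiomatic two-pass rewrite of A (run-length encode, then filter/emit); same return value, no speed claim.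

-- ===== PORT A =====
-- inner while: 'while i < n and seq[i] == token: i += 1' — number of leading elements of the tail equal to token
def pvTakeRun (r : List Int) (token : Int) : Nat :=
  match r with
  | [] => 0
  | x :: xs => if x = token then pvTakeRun xs token + 1 else 0

-- outer while over the remaining suffix of seq, carrying the current index i and the events list
def pvLoopA (stay_offset pad_token : Int) (rest : List Int) (i : Int)
    (events : List (List (String × Int))) : List (List (String × Int)) :=
  match rest with
  | [] => events
  | token :: r =>
    if stay_offset ≤ token ∧ token < pad_token then
      let c := pvTakeRun r token
      pvLoopA stay_offset pad_token (r.drop c) (i + 1 + (c : Int))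
        (events ++ [[("start", i), ("end", i + 1 + (c : Int)), ("node", token - stay_offset), ("dur", 1 + (c : Int))]])
    else
      pvLoopA stay_offset pad_token r (i + 1) events
termination_by rest.length
decreasing_by
  · simp only [List.length_drop, List.length_cons]; omega
  · simp

def get_stay_events (seq : List Int) (stay_offset : Int) (pad_token : Int) : List (List (String × Int)) :=
  pvLoopA stay_offset pad_token seq 0 []

-- ===== PORT B =====
-- pass 1: run-length encode (Source B's loop: extend the last run or append a fresh one)
def pvRleStep (runs : List (Int × Int)) (t : Int) : List (Int × Int) :=
  match runs.getLast? with
  | some (t0, k) => if t0 = t then runs.dropLast ++ [(t, k + 1)] else runs ++ [(t, 1)]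
  | none => runs ++ [(t, 1)]

-- pass 2: scan the runs with a cumulative start, emitting stay runs
def pvEmitStep (stay_offset pad_token : Int) (acc : Int × List (List (String × Int)))
    (tk : Int × Int) : Int × List (List (String × Int)) :=
  let e := acc.1 + tk.2
  (e, if stay_offset ≤ tk.1 ∧ tk.1 < pad_token then
        acc.2 ++ [[("start", acc.1), ("end", e), ("node", tk.1 - stay_offset), ("dur", tk.2)]]
      else acc.2)

def get_stay_events_alt (seq : List Int) (stay_offset : Int) (pad_token : Int) : List (List (String × Int)) :=
  let runs := seq.foldl pvRleStep []
  (runs.foldl (pvEmitStep stay_offset pad_token) (0, [])).2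

-- ===== PRECONDITION & SPEC =====
def Spec_get_stay_events (seq : List Int) (stay_offset : Int) (pad_token : Int) (out : List (List (String × Int))) : Prop := out = get_stay_events_alt seq stay_offset pad_token
instance (seq : List Int) (stay_offset : Int) (pad_token : Int) (out : List (List (String × Int))) : Decidable (Spec_get_stay_events seq stay_offset pad_token out) := by unfold Spec_get_stay_events; infer_instance

-- ===== CLAIM (what is proved, stated in full; the proofs are below) =====
def Claim_equal_get_stay_events : Prop := ∀ (seq : List Int) (stay_offset : Int) (pad_token : Int), Dom_get_stay_events seq stay_offset pad_token → Spec_get_stay_events seq stay_offset pad_token (get_stay_events seq stay_offset pad_token)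

-- ===== LEMMAS AND PROOFS =====

-- recursive characterisation of B's pass 1: 'pvExt t k r' is the RLE of r with an open run (t, k) in front
def pvExt (t : Int) (k : Int) (r : List Int) : List (Int × Int) :=
  match r with
  | [] => [(t, k)]
  | x :: xs => if x = t then pvExt t (k + 1) xs else (t, k) :: pvExt x 1 xs

def pvGroups (r : List Int) : List (Int × Int) :=
  match r with
  | [] => []
  | x :: xs => pvExt x 1 xs

-- recursive characterisation of B's pass 2
def pvEmitR (stay_offset pad_token : Int) (gs : List (Int × Int)) (i : Int) : List (List (String × Int)) :=
  match gs with
  | [] => []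
  | (t, k) :: rest =>
    (if stay_offset ≤ t ∧ t < pad_token then
      [[("start", i), ("end", i + k), ("node", t - stay_offset), ("dur", k)]]
     else []) ++ pvEmitR stay_offset pad_token rest (i + k)

lemma pvRle_foldl_eq (r : List Int) : ∀ (ys : List (Int × Int)) (t k : Int),
    (r.foldl pvRleStep (ys ++ [(t, k)])) = ys ++ pvExt t k r := by
  induction r with
  | nil => intro ys t k; simp [pvExt]
  | cons x xs ih =>
    intro ys t k
    simp only [List.foldl_cons, pvRleStep, List.getLast?_append, List.getLast?_singleton,
      Option.some_or, pvExt]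
    by_cases h : t = x
    · subst h
      simp only [if_true, List.dropLast_concat]
      rw [ih ys t (k + 1)]
    · have h' : ¬ x = t := fun he => h he.symm
      rw [if_neg h, if_neg h',
        show (ys ++ [(t, k)]) ++ [(x, (1 : Int))] = (ys ++ [(t, k)]) ++ [(x, (1 : Int))] from rfl,
        ih (ys ++ [(t, k)]) x 1]
      simp

lemma pvEmit_foldl_eq (so pt : Int) (gs : List (Int × Int)) :
    ∀ (i : Int) (ev : List (List (String × Int))),
    (gs.foldl (pvEmitStep so pt) (i, ev)) =
      ((i + ((gs.map Prod.snd).sum), ev ++ pvEmitR so pt gs i)) := by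
  induction gs with
  | nil => intro i ev; simp [pvEmitR]
  | cons g rest ih =>
    intro i ev
    obtain ⟨t, k⟩ := g
    simp only [List.foldl_cons, pvEmitStep, pvEmitR, ih, Prod.mk.injEq]
    constructor
    · simp; ring
    · split_ifs with h <;> simp

lemma pvAlt_eq_emitR (seq : List Int) (so pt : Int) :
    get_stay_events_alt seq so pt = pvEmitR so pt (pvGroups seq) 0 := by
  unfold get_stay_events_alt
  cases seq with
  | nil => simp [pvGroups, pvEmitR]
  | cons x xs =>
    have h1 : (x :: xs).foldl pvRleStep [] = pvExt x 1 xs := by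
      simpa using pvRle_foldl_eq xs [] x 1
    simp only [h1, pvEmit_foldl_eq, pvGroups, List.nil_append]

lemma pvExt_eq (r : List Int) : ∀ (t k : Int),
    pvExt t k r = (t, k + (pvTakeRun r t : Int)) :: pvGroups (r.drop (pvTakeRun r t)) := by
  induction r with
  | nil => intro t k; simp [pvExt, pvTakeRun, pvGroups]
  | cons x xs ih =>
    intro t k
    simp only [pvExt, pvTakeRun]
    by_cases h : x = t
    · subst h
      rw [if_pos rfl, if_pos rfl, ih x (k + 1)]
      rw [List.drop_succ_cons]
      congr 2
      push_cast
      ring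
    · rw [if_neg h, if_neg h]
      simp [pvGroups]

-- skipping one non-stay token: the group decomposition shifts the start by one
lemma pvEmitR_skip (so pt t : Int) (r : List Int) (i : Int) (hc : ¬ (so ≤ t ∧ t < pt)) :
    pvEmitR so pt (pvGroups (t :: r)) i = pvEmitR so pt (pvGroups r) (i + 1) := by
  have hG : pvGroups (t :: r) = pvExt t 1 r := rfl
  rw [hG, pvExt_eq, pvEmitR, if_neg hc]
  cases r with
  | nil => simp [pvTakeRun, pvGroups, pvEmitR]
  | cons x xs =>
    by_cases h : x = t
    · subst h
      have hT : pvTakeRun (x :: xs) x = pvTakeRun xs x + 1 := by simp [pvTakeRun]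
      rw [hT, List.drop_succ_cons]
      have hG2 : pvGroups (x :: xs) = pvExt x 1 xs := rfl
      rw [hG2, pvExt_eq, pvEmitR, if_neg hc]
      rw [show i + (1 + ((pvTakeRun xs x + 1 : Nat) : Int)) = i + 1 + (1 + ((pvTakeRun xs x : Nat) : Int)) from by push_cast; ring]
    · have hT : pvTakeRun (x :: xs) t = 0 := by simp [pvTakeRun, h]
      rw [hT]
      simp only [List.drop_zero, List.nil_append]
      congr 1

-- the main invariant: A's loop from index i equals B's emit over the groups of the remaining suffix
lemma pvLoop_eq_emitR (so pt : Int) : ∀ (rest : List Int) (i : Int) (ev : List (List (String × Int))),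
    pvLoopA so pt rest i ev = ev ++ pvEmitR so pt (pvGroups rest) i := by
  have H : ∀ (n : Nat) (rest : List Int), rest.length = n → ∀ (i : Int) (ev : List (List (String × Int))),
      pvLoopA so pt rest i ev = ev ++ pvEmitR so pt (pvGroups rest) i := by
    intro n
    induction n using Nat.strong_induction_on with
    | _ n ih =>
      intro rest hlen i ev
      cases rest with
      | nil => simp [pvLoopA, pvGroups, pvEmitR]
      | cons t r =>
        rw [pvLoopA]
        by_cases hc : so ≤ t ∧ t < pt
        · rw [if_pos hc]
          have hlt : (r.drop (pvTakeRun r t)).length < n := by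
            simp only [List.length_drop, List.length_cons] at *
            omega
          rw [ih _ hlt _ rfl]
          have hG : pvGroups (t :: r) = pvExt t 1 r := rfl
          rw [hG, pvExt_eq, pvEmitR, if_pos hc]
          rw [show i + 1 + ((pvTakeRun r t : Nat) : Int) = i + (1 + ((pvTakeRun r t : Nat) : Int)) from by ring]
          simp [List.append_assoc]
        · rw [if_neg hc]
          have hlt : r.length < n := by simp only [List.length_cons] at hlen; omega
          rw [ih _ hlt _ rfl, pvEmitR_skip so pt t r i hc]
  intro rest
  exact H rest.length rest rfl

-- ===== VERDICT (by name: the statement is the Claim_ definition above) =====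
theorem get_stay_events_spec : Claim_equal_get_stay_events := by
  intro seq so pt _
  unfold Spec_get_stay_events get_stay_events
  rw [pvAlt_eq_emitR, pvLoop_eq_emitR]
  simp
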